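-- pv_equiv track=rewrite | github.com/anasuyam/Encrypted_Negative_Password | App/mytest_n.py | permrev
-- ===== SOURCE A (Python) =====
-- def permrev(l):
--      k=[]
--
--      for i in range(0,len(l),4):
--          k.append(l[i:i+4])
--      a=k
--      for i in range(len(k)-1,-1,-1):
--          for j in range(len(k)-1,-1,-1):
--              k[i],k[j]=k[j],k[i]
--      up=""
--      for i in k:
--          up+="".join(i)
--      s=""
--
--      for i in range(len(l)):
--          s+="*"
--      s=list(s)
--      res=""
--      for i in range(len(s)):
--          s[i]=up[i]
--      res+="".join(s)
--      return res
-- ===== SOURCE B (Python) =====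
-- def permrev(l):
--     k = [l[i:i+4] for i in range(0, len(l), 4)]
--     return "".join(k[-2:] + k[:-2])
-- ===== Notes on version B (the rewrite author's own statement) =====
-- stated objective: faster
-- what changed: A's quadratic double swap loop over the 4-char chunk list (plus its star-string copy pass) is replaced by slicing the chunk list into a right rotation by 2 and joining once.
import Mathlib
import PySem

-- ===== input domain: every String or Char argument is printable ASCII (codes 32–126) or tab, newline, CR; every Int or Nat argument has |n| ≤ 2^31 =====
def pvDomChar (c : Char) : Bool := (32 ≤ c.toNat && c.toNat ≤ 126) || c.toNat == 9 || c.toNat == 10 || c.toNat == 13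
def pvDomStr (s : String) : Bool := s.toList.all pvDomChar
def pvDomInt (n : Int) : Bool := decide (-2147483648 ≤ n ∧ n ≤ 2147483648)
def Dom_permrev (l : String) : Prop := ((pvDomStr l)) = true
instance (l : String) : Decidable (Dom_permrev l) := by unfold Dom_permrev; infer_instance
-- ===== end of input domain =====

-- B replaces A's quadratic double swap loop over the 4-char chunk list (and its star-string
-- copy pass) by a single right rotation of the chunk list by 2, built with slices, joined once.

-- ===== PORT A =====
-- literal transliteration of A; all list indices used by A are in range, so pyGetD/pySetD are
-- exact there, and "".join(x) over a string x is ported as join [] of x's 1-char pieces.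
def permrev (l : String) : String :=
  let ls := l.toList
  let n : Int := PySem.Chars.len ls
  -- k = []; for i in range(0, len(l), 4): k.append(l[i:i+4])
  let k : List (List Char) :=
    (PySem.List.pyRange 0 n 4).foldl
      (fun k i => k ++ [PySem.Chars.slice ls (some i) (some (i + 4))]) []
  -- a = k  (alias, never used again)
  -- for i in range(len(k)-1,-1,-1): for j in range(len(k)-1,-1,-1): k[i],k[j] = k[j],k[i]
  let k :=
    (PySem.List.pyRange ((k.length : Int) - 1) (-1) (-1)).foldl (fun k i =>
      (PySem.List.pyRange ((k.length : Int) - 1) (-1) (-1)).foldl (fun k j =>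
        let ki := PySem.List.pyGetD k i []
        let kj := PySem.List.pyGetD k j []
        PySem.List.pySetD (PySem.List.pySetD k i kj) j ki) k) k
  -- up = ""; for i in k: up += "".join(i)
  let up : List Char := k.foldl (fun up i => up ++ PySem.Chars.join [] (i.map (fun c => [c]))) []
  -- s = ""; for i in range(len(l)): s += "*"
  let s : List Char := (PySem.List.pyRange 0 n 1).foldl (fun s _ => s ++ ['*']) []
  -- s = list(s)  (identity on List Char)
  -- for i in range(len(s)): s[i] = up[i]
  let s := (PySem.List.pyRange 0 (PySem.Chars.len s) 1).foldl (fun s i =>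
    PySem.List.pySetD s i (PySem.List.pyGetD up i ' ')) s
  -- res = ""; res += "".join(s); return res
  let res : List Char := [] ++ PySem.Chars.join [] (s.map (fun c => [c]))
  String.ofList res

-- ===== PORT B =====
-- k = [l[i:i+4] for i in range(0, len(l), 4)]; return "".join(k[-2:] + k[:-2])
def permrev_alt (l : String) : String :=
  let ls := l.toList
  let k : List (List Char) :=
    (PySem.List.pyRange 0 (PySem.Chars.len ls) 4).map
      (fun i => PySem.Chars.slice ls (some i) (some (i + 4)))
  String.ofList (PySem.Chars.join []
    (PySem.List.slice k (some (-2)) none ++ PySem.List.slice k none (some (-2))))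

-- ===== PRECONDITION & SPEC =====
def Spec_permrev (l : String) (out : String) : Prop := out = permrev_alt l
instance (l : String) (out : String) : Decidable (Spec_permrev l out) := by unfold Spec_permrev; infer_instance

-- ===== CLAIM (what is proved, stated in full; the proofs are below) =====
def Claim_equal_permrev : Prop := ∀ (l : String), Dom_permrev l → Spec_permrev l (permrev l)

-- ===== LEMMAS AND PROOFS =====

def downRec {α : Type} (g : List α → Int → List α) : Nat → List α → List α
  | 0, k => k
  | c + 1, k => downRec g c (g k (c : Int))

lemma foldl_pyRange_desc {α : Type} (g : List α → Int → List α) :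
    ∀ (c : Nat) (k : List α),
      (PySem.List.pyRange ((c : Int) - 1) (-1) (-1)).foldl g k = downRec g c k := by
  intro c
  induction c with
  | zero => intro k; rw [PySem.List.pyRange_neg_one_eq_nil (by norm_num)]; rfl
  | succ c ih =>
      intro k
      have h1 : ((c + 1 : Nat) : Int) - 1 = (c : Int) := by push_cast; ring
      rw [h1, PySem.List.pyRange_neg_one_cons (by omega)]
      simp only [List.foldl_cons]
      rw [show (c : Int) - 1 = ((c : Nat) : Int) - 1 by norm_num, ih]
      rfl

def sw {α : Type} (k : List α) (i j : Nat) (d : α) : List α :=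
  (k.set i (k.getD j d)).set j (k.getD i d)
lemma sw_getElem? {α : Type} (k : List α) (i j : Nat) (d : α)
    (hi : i < k.length) (hj : j < k.length) (p : Nat) :
    (sw k i j d)[p]? = if p = j then k[i]? else if p = i then k[j]? else k[p]? := by
  have hgi : k.getD i d = k[i] := by rw [List.getD_eq_getElem?_getD, List.getElem?_eq_getElem hi]; rfl
  have hgj : k.getD j d = k[j] := by rw [List.getD_eq_getElem?_getD, List.getElem?_eq_getElem hj]; rfl
  simp only [sw, List.getElem?_set, List.length_set, hgi, hgj]
  split_ifs with h1 h2 h3 h4 h5 h6 h7 h8 <;>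
    first
      | rfl
      | omega
      | (subst_vars; rw [List.getElem?_eq_getElem hi])
      | (subst_vars; rw [List.getElem?_eq_getElem hj])
def innerD {α : Type} (i : Nat) (d : α) : Nat → List α → List α
  | 0, k => k
  | j + 1, k => innerD i d j (sw k i j d)
def sig (i j p : Nat) : Nat :=
  if j = 0 then p
  else if j ≤ i + 1 then
    if p = i then 0 else if p + 1 < j then p + 1 else if p + 1 = j then i else p
  else
    if p = i then (if i = 0 then 1 else 0)
    else if p + 1 = i then i + 1
    else if p + 1 = j then i
    else if p + 1 < j then p + 1
    else p
lemma length_sw {α : Type} (k : List α) (i j : Nat) (d : α) : (sw k i j d).length = k.length := by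
  simp [sw]
lemma sig_step (i j p : Nat) :
    (if sig i j p = j then i else if sig i j p = i then j else sig i j p) = sig i (j + 1) p := by
  unfold sig
  split_ifs <;> first | omega | exact False.elim (by assumption)

lemma inner_char {α : Type} (i : Nat) (d : α) :
    ∀ (j : Nat) (k : List α), i < k.length → j ≤ k.length →
      (innerD i d j k).length = k.length ∧
      ∀ p, p < k.length → (innerD i d j k)[p]? = k[sig i j p]? := by
  intro j
  induction j with
  | zero =>
      intro k hi _
      refine ⟨rfl, fun p hp => ?_⟩
      simp [innerD, sig]
  | succ j ih =>
      intro k hi hj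
      have hl := length_sw k i j d
      have hj' : j < k.length := by omega
      obtain ⟨ihlen, ihget⟩ := ih (sw k i j d) (by omega) (by omega)
      refine ⟨by simpa [hl] using ihlen, fun p hp => ?_⟩
      have h1 : (innerD i d (j + 1) k)[p]? = (sw k i j d)[sig i j p]? := by
        show (innerD i d j (sw k i j d))[p]? = _
        exact ihget p (by omega)
      rw [h1, sw_getElem? _ _ _ _ hi hj']
      have hstep : (if sig i j p = j then k[i]? else if sig i j p = i then k[j]? else k[sig i j p]?)
           = k[(if sig i j p = j then i else if sig i j p = i then j else sig i j p)]? := by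
        split_ifs <;> rfl
      rw [hstep, sig_step]

def outerD {α : Type} (d : α) : Nat → List α → List α
  | 0, k => k
  | c + 1, k => outerD d c (innerD c d k.length k)

def tau (c n p : Nat) : Nat :=
  if p = 0 then c - 2
  else if p ≤ n - 1 - c then c + p
  else if p = (n - 1 - c) + 1 then c - 1
  else if c ≤ n - 1 ∧ p = (n - 1 - c) + 2 then c
  else p - ((n - 1 - c) + 2 + (if c ≤ n - 1 then 1 else 0))

lemma sig_lt {i j p n : Nat} (hi : i < n) (hj : j ≤ n) (hp : p < n) : sig i j p < n := by
  unfold sig; split_ifs <;> omega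

lemma tau_lt {c n p : Nat} (hc : 2 ≤ c) (hcn : c ≤ n) (hp : p < n) : tau c n p < n := by
  unfold tau; split_ifs <;> omega

lemma sigA {n p i : Nat} (h1 : p = i) (h2 : i = 0) (h3 : 2 ≤ n) : sig i n p = 1 := by
  unfold sig; split_ifs <;> omega

lemma sigA' {n p i : Nat} (h1 : p = i) (h2 : 1 ≤ i) (h3 : i < n) : sig i n p = 0 := by
  unfold sig; split_ifs <;> omega

lemma sigB1 {n p i : Nat} (h1 : p + 1 = i) (h2 : i + 2 ≤ n) : sig i n p = i + 1 := by
  unfold sig; split_ifs <;> omega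

lemma sigB2 {n p i : Nat} (h1 : p + 1 = i) (h2 : i + 1 = n) : sig i n p = p + 1 := by
  unfold sig; split_ifs <;> omega

lemma sigC {n p i : Nat} (h1 : p + 1 = n) (h2 : p ≠ i) (h3 : p + 1 ≠ i) : sig i n p = i := by
  unfold sig; split_ifs <;> omega

lemma sigD {n p i : Nat} (h1 : p ≠ i) (h2 : p + 1 ≠ i) (h3 : p + 1 < n) : sig i n p = p + 1 := by
  unfold sig; split_ifs <;> omega

lemma tau0 {c n p : Nat} (h : p = 0) : tau c n p = c - 2 := by
  unfold tau; rw [if_pos h]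

lemma tau1 {c n p : Nat} (h1 : 1 ≤ p) (h2 : p ≤ n - 1 - c) : tau c n p = c + p := by
  unfold tau; split_ifs <;> omega

lemma tau2 {c n p : Nat} (h1 : 1 ≤ p) (h2 : p = (n - 1 - c) + 1) : tau c n p = c - 1 := by
  unfold tau; split_ifs <;> omega

lemma tau3 {c n p : Nat} (h1 : c ≤ n - 1) (h3 : p = (n - 1 - c) + 2) :
    tau c n p = c := by
  unfold tau; split_ifs <;> omega

lemma tau4a {c n p : Nat} (h1 : c ≤ n - 1) (h2 : (n - 1 - c) + 3 ≤ p) :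
    tau c n p = p - ((n - 1 - c) + 3) := by
  unfold tau; split_ifs <;> omega

lemma tau4b {c n p : Nat} (h1 : n ≤ c) (h2 : 2 ≤ p) (h3 : 1 ≤ c) : tau c n p = p - 2 := by
  unfold tau; split_ifs <;> omega

lemma tau_base {n p : Nat} (hn : 2 ≤ n) (hp : p < n) : sig 1 n (sig 0 n p) = tau 2 n p := by
  by_cases h0 : p = 0
  · rw [sigA (i := 0) (n := n) (p := p) h0 rfl hn,
        sigA' (i := 1) (n := n) (p := 1) rfl (by omega) (by omega),
        tau0 (c := 2) (n := n) (p := p) h0]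
  by_cases h1 : p + 1 = n
  · rw [sigC (i := 0) (n := n) (p := p) (by omega) (by omega) (by omega)]
    by_cases h2 : n = 2
    · rw [sigB2 (i := 1) (n := n) (p := 0) (by omega) (by omega),
          tau2 (c := 2) (n := n) (p := p) (by omega) (by omega)]
    · rw [sigB1 (i := 1) (n := n) (p := 0) (by omega) (by omega),
          tau3 (c := 2) (n := n) (p := p) (by omega) (by omega)]
  · rw [sigD (i := 0) (n := n) (p := p) (by omega) (by omega) (by omega)]
    by_cases h2 : p + 2 = n
    · rw [sigC (i := 1) (n := n) (p := p + 1) (by omega) (by omega) (by omega),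
          tau2 (c := 2) (n := n) (p := p) (by omega) (by omega)]
    · rw [sigD (i := 1) (n := n) (p := p + 1) (by omega) (by omega) (by omega),
          tau1 (c := 2) (n := n) (p := p) (by omega) (by omega)]
      omega

lemma tau_step {c n p : Nat} (hc : 2 ≤ c) (hcn : c + 1 ≤ n) (hp : p < n) :
    sig c n (tau c n p) = tau (c + 1) n p := by
  by_cases h0 : p = 0
  · rw [tau0 (c := c) (n := n) (p := p) h0,
        sigD (i := c) (n := n) (p := c - 2) (by omega) (by omega) (by omega),
        tau0 (c := c + 1) (n := n) (p := p) h0]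
    omega
  by_cases h1 : p ≤ n - 1 - c
  · rw [tau1 (c := c) (n := n) (p := p) (by omega) h1]
    by_cases h2 : p = n - 1 - c
    · rw [sigC (i := c) (n := n) (p := c + p) (by omega) (by omega) (by omega),
          tau2 (c := c + 1) (n := n) (p := p) (by omega) (by omega)]
      omega
    · rw [sigD (i := c) (n := n) (p := c + p) (by omega) (by omega) (by omega),
          tau1 (c := c + 1) (n := n) (p := p) (by omega) (by omega)]
      omega
  by_cases h2 : p = (n - 1 - c) + 1
  · rw [tau2 (c := c) (n := n) (p := p) (by omega) h2]
    by_cases h3 : c + 2 ≤ n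
    · rw [sigB1 (i := c) (n := n) (p := c - 1) (by omega) (by omega),
          tau3 (c := c + 1) (n := n) (p := p) (by omega) (by omega)]
    · rw [sigB2 (i := c) (n := n) (p := c - 1) (by omega) (by omega),
          tau2 (c := c + 1) (n := n) (p := p) (by omega) (by omega)]
      omega
  by_cases h3 : p = (n - 1 - c) + 2
  · rw [tau3 (c := c) (n := n) (p := p) (by omega) h3,
        sigA' (i := c) (n := n) (p := c) rfl (by omega) (by omega)]
    by_cases h4 : c + 1 ≤ n - 1
    · rw [tau4a (c := c + 1) (n := n) (p := p) h4 (by omega)]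
      omega
    · rw [tau4b (c := c + 1) (n := n) (p := p) (by omega) (by omega) (by omega)]
      omega
  · rw [tau4a (c := c) (n := n) (p := p) (by omega) (by omega),
        sigD (i := c) (n := n) (p := p - ((n - 1 - c) + 3)) (by omega) (by omega) (by omega)]
    by_cases h4 : c + 1 ≤ n - 1
    · rw [tau4a (c := c + 1) (n := n) (p := p) h4 (by omega)]
      omega
    · rw [tau4b (c := c + 1) (n := n) (p := p) (by omega) (by omega) (by omega)]
      omega

lemma outer_char {α : Type} (d : α) :
    ∀ (c : Nat), 2 ≤ c → ∀ (k : List α), c ≤ k.length →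
      (outerD d c k).length = k.length ∧
      ∀ p, p < k.length → (outerD d c k)[p]? = k[tau c k.length p]? := by
  intro c hc
  induction c, hc using Nat.le_induction with
  | base =>
      intro k hk
      obtain ⟨h1len, h1get⟩ := inner_char 1 d k.length k (by omega) (le_refl _)
      obtain ⟨h2len, h2get⟩ := inner_char 0 d (innerD 1 d k.length k).length (innerD 1 d k.length k)
        (by omega) (le_refl _)
      have he : outerD d 2 k = innerD 0 d (innerD 1 d k.length k).length (innerD 1 d k.length k) := rfl
      rw [h1len] at he h2len h2get
      refine ⟨by rw [he]; exact h2len, fun p hp => ?_⟩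
      rw [he, h2get p hp, h1get _ (sig_lt (by omega) (le_refl _) hp), tau_base (by omega) hp]
  | succ c hc ih =>
      intro k hk
      obtain ⟨hilen, higet⟩ := inner_char c d k.length k (by omega) (le_refl _)
      obtain ⟨holen, hoget⟩ := ih (innerD c d k.length k) (by omega)
      have he : outerD d (c + 1) k = outerD d c (innerD c d k.length k) := rfl
      rw [hilen] at holen hoget
      refine ⟨by rw [he]; exact holen, fun p hp => ?_⟩
      rw [he, hoget p hp, higet _ (tau_lt hc (by omega) hp), tau_step hc hk hp]

lemma tau_top {n p : Nat} (hn : 2 ≤ n) (hp : p < n) :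
    tau n n p = if p = 0 then n - 2 else if p = 1 then n - 1 else p - 2 := by
  unfold tau; split_ifs <;> omega

lemma outerD_eq_rot2 {α : Type} (d : α) (k : List α) :
    outerD d k.length k = k.drop (k.length - 2) ++ k.take (k.length - 2) := by
  by_cases h0 : k.length = 0
  · have hk : k = [] := List.eq_nil_of_length_eq_zero h0
    subst hk; rfl
  by_cases h1 : k.length = 1
  · obtain ⟨a, hk⟩ := List.length_eq_one_iff.mp h1
    subst hk
    show outerD d 1 [a] = _
    simp [outerD, innerD, sw]
  · have hn : 2 ≤ k.length := by omega
    obtain ⟨hlen, hget⟩ := outer_char d k.length (by omega) k (le_refl _)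
    apply List.ext_getElem?
    intro p
    by_cases hp : p < k.length
    · rw [hget p hp]
      have hd : (k.drop (k.length - 2)).length = 2 := by
        rw [List.length_drop]; omega
      by_cases hp0 : p = 0
      · have ht : tau k.length k.length p = k.length - 2 := by rw [tau_top hn hp, if_pos hp0]
        rw [ht, List.getElem?_append_left (by rw [hd]; omega), List.getElem?_drop]
        congr 1
        omega
      by_cases hp1 : p = 1
      · have ht : tau k.length k.length p = k.length - 1 := by
          rw [tau_top hn hp, if_neg hp0, if_pos hp1]
        rw [ht, List.getElem?_append_left (by rw [hd]; omega), List.getElem?_drop]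
        congr 1
        omega
      · have ht : tau k.length k.length p = p - 2 := by
          rw [tau_top hn hp, if_neg hp0, if_neg hp1]
        rw [ht, List.getElem?_append_right (by rw [hd]; omega), hd, List.getElem?_take,
            if_pos (by omega)]
    · rw [List.getElem?_eq_none (by rw [hlen]; omega), List.getElem?_eq_none]
      rw [List.length_append, List.length_drop, List.length_take]
      omega

lemma join_nil_flatten : ∀ (xss : List (List Char)), PySem.Chars.join [] xss = xss.flatten := by
  intro xss
  induction xss with
  | nil => rfl
  | cons h t ih =>
      cases t with
      | nil => rw [PySem.Chars.join_singleton]; simp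
      | cons h2 t2 =>
          rw [PySem.Chars.join_cons_cons, ih]
          simp

lemma overwrite_aux (up : List Char) :
    ∀ (j : Nat) (s : List Char), s.length = up.length → j ≤ s.length →
      (List.range j).foldl
        (fun s (i : Nat) => PySem.List.pySetD s (i : Int) (PySem.List.pyGetD up (i : Int) ' ')) s
      = up.take j ++ s.drop j := by
  intro j
  induction j with
  | zero => intro s h hj; simp
  | succ j ih =>
      intro s h hj
      rw [List.range_succ, List.foldl_append, ih s h (by omega)]
      simp only [List.foldl_cons, List.foldl_nil]
      rw [PySem.List.pySetD_natCast, PySem.List.pyGetD_natCast]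
      have hju : j < up.length := by omega
      have hjs : j < s.length := by omega
      have htl : (up.take j).length = j := by rw [List.length_take]; omega
      rw [List.set_append_right _ _ (by omega), htl, Nat.sub_self,
          List.drop_eq_getElem_cons hjs]
      have hgd : up.getD j ' ' = up[j] := by
        rw [List.getD_eq_getElem?_getD, List.getElem?_eq_getElem hju]; rfl
      rw [hgd]
      show up.take j ++ up[j] :: s.drop (j + 1) = up.take (j + 1) ++ s.drop (j + 1)
      conv_rhs => rw [List.take_add_one, List.getElem?_eq_getElem hju]
      rw [List.append_assoc]
      rfl

lemma overwrite_eq (s up : List Char) (h : s.length = up.length) :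
    (PySem.List.pyRange 0 (s.length : Int) 1).foldl
      (fun s i => PySem.List.pySetD s i (PySem.List.pyGetD up i ' ')) s = up := by
  rw [PySem.List.pyRange_one, List.foldl_map]
  have h0 : ((s.length : Int) - 0).toNat = s.length := by omega
  rw [h0]
  have h1 : ∀ (t : List Char) (kk : Nat),
      PySem.List.pySetD t ((0 : Int) + (kk : Int)) (PySem.List.pyGetD up ((0 : Int) + (kk : Int)) ' ')
      = PySem.List.pySetD t (kk : Int) (PySem.List.pyGetD up (kk : Int) ' ') := by
    intro t kk; rw [zero_add]
  calc (List.range s.length).foldl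
        (fun t (kk : Nat) => PySem.List.pySetD t ((0 : Int) + (kk : Int)) (PySem.List.pyGetD up ((0 : Int) + (kk : Int)) ' ')) s
      = (List.range s.length).foldl
        (fun t (kk : Nat) => PySem.List.pySetD t (kk : Int) (PySem.List.pyGetD up (kk : Int) ' ')) s := by
        apply PySem.List.foldl_congr_mem
        intro acc x _
        exact h1 acc x
    _ = up.take s.length ++ s.drop s.length := overwrite_aux up s.length s h (le_refl _)
    _ = up := by rw [List.drop_length, List.append_nil, h, List.take_length]

lemma chunks_aux : ∀ (q : Nat) (ls : List Char), ls.length ≤ 4 * q →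
    ((List.range q).map (fun t => (ls.drop (4 * t)).take 4)).flatten = ls := by
  intro q
  induction q with
  | zero =>
      intro ls h
      have : ls = [] := List.eq_nil_of_length_eq_zero (by omega)
      subst this; rfl
  | succ q ih =>
      intro ls h
      rw [List.range_succ_eq_map, List.map_cons, List.map_map, List.flatten_cons]
      have e1 : (List.map ((fun t => (ls.drop (4 * t)).take 4) ∘ Nat.succ) (List.range q))
          = List.map (fun t => ((ls.drop 4).drop (4 * t)).take 4) (List.range q) := by
        apply List.map_congr_left
        intro t _
        show (ls.drop (4 * (t + 1))).take 4 = ((ls.drop 4).drop (4 * t)).take 4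
        rw [List.drop_drop, show 4 + 4 * t = 4 * (t + 1) from by ring]
      rw [e1, ih (ls.drop 4) (by simp only [List.length_drop]; omega)]
      simp


lemma chunks_flatten (ls : List Char) :
    ((PySem.List.pyRange 0 (ls.length : Int) 4).map
      (fun i => PySem.List.slice ls (some i) (some (i + 4)))).flatten = ls := by
  rw [PySem.List.pyRange_of_pos 0 (ls.length : Int) (by norm_num), List.map_map]
  have e1 : ((fun i => PySem.List.slice ls (some i) (some (i + 4))) ∘ (fun k : Nat => (0 : ℤ) + 4 * (k : ℤ)))
      = fun t : Nat => (ls.drop (4 * t)).take 4 := by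
    funext t
    show PySem.List.slice ls (some ((0 : ℤ) + 4 * (t : ℤ))) (some ((0 : ℤ) + 4 * (t : ℤ) + 4)) = _
    have c1 : (0 : ℤ) + 4 * (t : ℤ) = ((4 * t : Nat) : ℤ) := by push_cast; ring
    have c2 : (0 : ℤ) + 4 * (t : ℤ) + 4 = ((4 * t + 4 : Nat) : ℤ) := by push_cast; ring
    rw [c2, c1, PySem.List.slice_natCast]
    congr 1
    omega
  rw [e1]
  apply chunks_aux
  split_ifs with h
  · omega
  · omega

lemma inner_bridge (c : Nat) : ∀ (j : Nat) (k : List (List Char)),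
    downRec (fun k j =>
      PySem.List.pySetD (PySem.List.pySetD k ((c : Nat) : Int) (PySem.List.pyGetD k j [])) j
        (PySem.List.pyGetD k ((c : Nat) : Int) [])) j k
    = innerD c ([] : List Char) j k := by
  intro j
  induction j with
  | zero => intro k; rfl
  | succ j ih =>
      intro k
      show downRec _ j
          (PySem.List.pySetD (PySem.List.pySetD k ((c : Nat) : Int) (PySem.List.pyGetD k ((j : Nat) : Int) []))
            ((j : Nat) : Int) (PySem.List.pyGetD k ((c : Nat) : Int) []))
        = innerD c [] j (sw k c j [])
      have hb : PySem.List.pySetD (PySem.List.pySetD k ((c : Nat) : Int) (PySem.List.pyGetD k ((j : Nat) : Int) []))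
            ((j : Nat) : Int) (PySem.List.pyGetD k ((c : Nat) : Int) []) = sw k c j [] := by
        simp [sw, PySem.List.pySetD_natCast, PySem.List.pyGetD_natCast]
      rw [hb, ih]

lemma outer_bridge : ∀ (c : Nat) (k : List (List Char)),
    downRec (fun k i =>
      (PySem.List.pyRange ((k.length : Int) - 1) (-1) (-1)).foldl
        (fun k j =>
          PySem.List.pySetD (PySem.List.pySetD k i (PySem.List.pyGetD k j [])) j
            (PySem.List.pyGetD k i [])) k) c k
    = outerD ([] : List Char) c k := by
  intro c
  induction c with
  | zero => intro k; rfl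
  | succ c ih =>
      intro k
      show downRec _ c
          ((PySem.List.pyRange ((k.length : Int) - 1) (-1) (-1)).foldl
            (fun k j =>
              PySem.List.pySetD (PySem.List.pySetD k ((c : Nat) : Int) (PySem.List.pyGetD k j [])) j
                (PySem.List.pyGetD k ((c : Nat) : Int) [])) k)
        = outerD ([] : List Char) c (innerD c [] k.length k)
      rw [foldl_pyRange_desc, inner_bridge, ih]

-- ===== VERDICT (by name: the statement is the Claim_ definition above) =====
theorem permrev_spec : Claim_equal_permrev := by
  unfold Claim_equal_permrev Spec_permrev
  intro l _
  unfold permrev permrev_alt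
  dsimp only
  simp only [PySem.Chars.len_eq, PySem.Chars.slice_eq_listSlice]
  rw [PySem.List.foldl_append_singleton_eq_map]
  simp only [List.nil_append]
  rw [foldl_pyRange_desc, outer_bridge, outerD_eq_rot2]
  simp only [PySem.Chars.join_nil_singletons]
  rw [PySem.List.foldl_append_eq_flatten]
  simp only [List.nil_append]
  rw [PySem.List.foldl_append_singleton_eq_map (f := fun _ => '*')]
  simp only [List.nil_append]
  set C := List.map (fun i => PySem.List.slice l.toList (some i) (some (i + 4)))
      (PySem.List.pyRange 0 ((l.toList.length : Int)) 4) with hCdef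
  have hCf : C.flatten = l.toList := chunks_flatten l.toList
  have hR : ((C.drop (C.length - 2) ++ C.take (C.length - 2)).flatten).length = l.toList.length := by
    rw [List.flatten_append, List.length_append, Nat.add_comm, ← List.length_append,
        ← List.flatten_append, List.take_append_drop, hCf]
  have hS : (List.map (fun _ : Int => '*') (PySem.List.pyRange 0 ((l.toList.length : Int)) 1)).length
      = ((C.drop (C.length - 2) ++ C.take (C.length - 2)).flatten).length := by
    rw [hR, List.length_map, PySem.List.length_pyRange_one]
    omega
  rw [overwrite_eq _ _ hS]
  rw [join_nil_flatten, PySem.List.slice_from_neg_ofNat C 2 (by norm_num),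
      PySem.List.slice_to_neg_ofNat C 2 (by norm_num)]
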